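-- pv_equiv track=rewrite | github.com/wooson00308/Beluca-Pipeline | src/bpe/core/nuke_render_paths.py | normalize_unc_to_drive
-- ===== SOURCE A (Python) =====
-- from typing import Dict, Optional, Tuple, Union
--
-- def normalize_unc_to_drive(path: str, unc_mappings: Dict[str, str]) -> str:
--     """UNC 접두사를 ``unc_mappings`` 에 따라 드라이브 문자 경로로 바꾼다.
--
--     ``unc_mappings`` 키는 ``//server/share`` 형태(슬래시), 값은 ``W:`` 또는 ``W:/`` 형태.
--     매칭은 키 길이 내림차순(가장 긴 접두사 우선). 이미 드라이브 문자이거나 매핑 없으면 그대로.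
--     """
--     if not path or not unc_mappings:
--         return path
--     s = path.replace("\\", "/")
--     if len(s) >= 2 and s[1] == ":":
--         return s
--     items = sorted(
--         ((k.strip().replace("\\", "/"), v.strip()) for k, v in unc_mappings.items()),
--         key=lambda kv: len(kv[0]),
--         reverse=True,
--     )
--     for unc_prefix, drive in items:
--         if not unc_prefix or not drive:
--             continue
--         pfx = unc_prefix if unc_prefix.startswith("//") else "//" + unc_prefix.lstrip("/")
--         if s.startswith(pfx):
--             suffix = s[len(pfx) :].lstrip("/")
--             d = drive.rstrip("/")
--             if len(d) == 2 and d[1] == ":":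
--                 return f"{d}/{suffix}" if suffix else d
--             return f"{d}/{suffix}" if suffix else d
--     return path
-- ===== SOURCE B (Python) =====
-- def normalize_unc_to_drive(path, unc_mappings):
--     """Single pass over the mappings tracking the longest matching prefix; no sort."""
--     if not path or not unc_mappings:
--         return path
--     s = path.replace("\\", "/")
--     if len(s) >= 2 and s[1] == ":":
--         return s
--     best = None  # (normalized_key, normalized_drive) with the longest matching key so far
--     for k, v in unc_mappings.items():
--         key = k.strip().replace("\\", "/")
--         drive = v.strip()
--         if not key or not drive:
--             continue
--         pfx = key if key.startswith("//") else "//" + key.lstrip("/")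
--         if s.startswith(pfx) and (best is None or len(best[0]) < len(key)):
--             best = (key, drive)
--     if best is None:
--         return path
--     key, drive = best
--     pfx = key if key.startswith("//") else "//" + key.lstrip("/")
--     suffix = s[len(pfx):].lstrip("/")
--     d = drive.rstrip("/")
--     return f"{d}/{suffix}" if suffix else d
-- ===== Notes on version B (the rewrite author's own statement) =====
-- stated objective: simpler
-- what changed: Replaces sort-by-length-then-scan-for-first-match with a single pass over the mappings that tracks the longest matching prefix (strict '>' on stripped-key length reproduces the stable reverse-sort tie-breaking), and drops the duplicated drive-letter formatting branch.
import Mathlib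
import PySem

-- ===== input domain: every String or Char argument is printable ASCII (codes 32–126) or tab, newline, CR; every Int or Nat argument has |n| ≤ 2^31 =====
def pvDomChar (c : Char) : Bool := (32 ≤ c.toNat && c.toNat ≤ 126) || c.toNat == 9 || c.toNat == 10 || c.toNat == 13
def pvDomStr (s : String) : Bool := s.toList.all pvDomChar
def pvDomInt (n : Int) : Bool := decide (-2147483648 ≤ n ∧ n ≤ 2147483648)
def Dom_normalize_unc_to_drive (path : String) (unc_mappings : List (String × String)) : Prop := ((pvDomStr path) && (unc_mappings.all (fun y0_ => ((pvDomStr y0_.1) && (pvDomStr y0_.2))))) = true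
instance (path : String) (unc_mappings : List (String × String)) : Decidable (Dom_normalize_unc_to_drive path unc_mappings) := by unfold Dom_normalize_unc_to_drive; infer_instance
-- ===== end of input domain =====

-- B replaces A's sort-by-key-length-then-first-match with one pass tracking the longest matching
-- prefix, and drops the duplicated formatting branch (objective: simpler).

-- shared helpers: both Pythons compute these identical expressions
-- x.lstrip("/") — exact: drops leading '/' characters
def pvLstripSlash (s : List Char) : List Char := s.dropWhile (fun c => c = '/')
-- x.rstrip("/") — exact: drops trailing '/' characters
def pvRstripSlash (s : List Char) : List Char := (s.reverse.dropWhile (fun c => c = '/')).reverse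
-- pfx = unc_prefix if unc_prefix.startswith("//") else "//" + unc_prefix.lstrip("/")
def pvPfx (k : List Char) : List Char :=
  if PySem.Chars.startswith k ['/', '/'] then k else '/' :: '/' :: pvLstripSlash k
-- (k.strip().replace("\\", "/"), v.strip())
def pvNorm (kv : String × String) : List Char × List Char :=
  (PySem.Chars.replace (PySem.Chars.strip kv.1.toList) ['\\'] ['/'], PySem.Chars.strip kv.2.toList)

-- ===== PORT A =====
-- the 'for unc_prefix, drive in items:' loop with its early return
def pvLoopA (s : List Char) (path : String) : List (List Char × List Char) → String
  | [] => path
  | (unc_prefix, drive) :: rest =>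
    if unc_prefix = [] ∨ drive = [] then pvLoopA s path rest
    else
      let pfx := pvPfx unc_prefix
      if PySem.Chars.startswith s pfx then
        let suffix := pvLstripSlash (PySem.List.slice s (some (PySem.List.len pfx)) none)
        let d := pvRstripSlash drive
        if PySem.List.len d = 2 ∧ PySem.List.pyGet? d 1 = some ':' then
          (if suffix ≠ [] then String.ofList (d ++ '/' :: suffix) else String.ofList d)
        else
          (if suffix ≠ [] then String.ofList (d ++ '/' :: suffix) else String.ofList d)
      else pvLoopA s path rest

def normalize_unc_to_drive (path : String) (unc_mappings : List (String × String)) : String :=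
  if path = "" ∨ unc_mappings = [] then path
  else
    let s := PySem.Chars.replace path.toList ['\\'] ['/']
    if 2 ≤ PySem.List.len s ∧ PySem.List.pyGet? s 1 = some ':' then String.ofList s
    else
      let items := PySem.List.sorted
        ((PySem.Dict.ofList unc_mappings).items.map pvNorm)
        (fun kv => PySem.List.len kv.1) true
      pvLoopA s path items

-- ===== PORT B =====
-- one loop iteration: keep the longest matching (key, drive) seen so far
def pvStep (s : List Char) (best : Option (List Char × List Char)) (kv : String × String) :
    Option (List Char × List Char) :=
  let key := PySem.Chars.replace (PySem.Chars.strip kv.1.toList) ['\\'] ['/']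
  let drive := PySem.Chars.strip kv.2.toList
  if key = [] ∨ drive = [] then best
  else
    if PySem.Chars.startswith s (pvPfx key) &&
        (match best with | none => true | some b => decide (PySem.List.len b.1 < PySem.List.len key)) then
      some (key, drive)
    else best

def normalize_unc_to_drive_alt (path : String) (unc_mappings : List (String × String)) : String :=
  if path = "" ∨ unc_mappings = [] then path
  else
    let s := PySem.Chars.replace path.toList ['\\'] ['/']
    if 2 ≤ PySem.List.len s ∧ PySem.List.pyGet? s 1 = some ':' then String.ofList s
    else
      match (PySem.Dict.ofList unc_mappings).items.foldl (pvStep s) none with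
      | none => path
      | some (key, drive) =>
        let suffix := pvLstripSlash (PySem.List.slice s (some (PySem.List.len (pvPfx key))) none)
        let d := pvRstripSlash drive
        if suffix ≠ [] then String.ofList (d ++ '/' :: suffix) else String.ofList d

-- ===== PRECONDITION & SPEC =====
def Spec_normalize_unc_to_drive (path : String) (unc_mappings : List (String × String)) (out : String) : Prop := out = normalize_unc_to_drive_alt path unc_mappings
instance (path : String) (unc_mappings : List (String × String)) (out : String) : Decidable (Spec_normalize_unc_to_drive path unc_mappings out) := by unfold Spec_normalize_unc_to_drive; infer_instance

-- ===== CLAIM (what is proved, stated in full; the proofs are below) =====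
def Claim_equal_normalize_unc_to_drive : Prop := ∀ (path : String) (unc_mappings : List (String × String)), Dom_normalize_unc_to_drive path unc_mappings → Spec_normalize_unc_to_drive path unc_mappings (normalize_unc_to_drive path unc_mappings)

-- ===== LEMMAS AND PROOFS =====

-- "this entry matches": nonempty key and drive, and s starts with its prefix
def pvValid (s : List Char) (p : List Char × List Char) : Bool :=
  !(decide (p.1 = [] ∨ p.2 = [])) && PySem.Chars.startswith s (pvPfx p.1)

-- the formatted result for a matching entry (both branches of A's redundant if)
def pvFmt (s : List Char) (p : List Char × List Char) : String :=
  let suffix := pvLstripSlash (PySem.List.slice s (some (PySem.List.len (pvPfx p.1))) none)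
  let d := pvRstripSlash p.2
  if suffix ≠ [] then String.ofList (d ++ '/' :: suffix) else String.ofList d

-- pvStep on an already-normalised pair
def pvStep' (s : List Char) (best : Option (List Char × List Char)) (p : List Char × List Char) :
    Option (List Char × List Char) :=
  if p.1 = [] ∨ p.2 = [] then best
  else
    if PySem.Chars.startswith s (pvPfx p.1) &&
        (match best with | none => true | some b => decide (PySem.List.len b.1 < PySem.List.len p.1)) then
      some p
    else best

lemma pvLoopA_eq_find (s : List Char) (path : String) :
    ∀ l : List (List Char × List Char),
      pvLoopA s path l = (match l.find? (pvValid s) with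
                          | some p => pvFmt s p
                          | none => path) := by
  intro l
  induction l with
  | nil => rfl
  | cons p rest ih =>
    obtain ⟨k, d⟩ := p
    by_cases h1 : k = [] ∨ d = []
    · simp [pvLoopA, h1, List.find?, pvValid, ih]
    · by_cases h2 : PySem.Chars.startswith s (pvPfx k) = true
      · simp [pvLoopA, h1, h2, List.find?, pvValid, pvFmt]
      · simp [pvLoopA, h1, h2, List.find?, pvValid, ih]

-- insertBy with the reverse comparator keeps a descending list descending
lemma pvPairwise_insertBy (key : List Char × List Char → Int) (x : List Char × List Char)
    (ys : List (List Char × List Char))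
    (h : ys.Pairwise (fun a b => key b ≤ key a)) :
    (PySem.List.insertBy (fun a b => decide (key b < key a)) x ys).Pairwise
      (fun a b => key b ≤ key a) := by
  induction ys with
  | nil => simp [PySem.List.insertBy]
  | cons y t ih =>
    rw [PySem.List.insertBy.eq_def]
    rcases List.pairwise_cons.mp h with ⟨hy, ht⟩
    by_cases hc : key y < key x
    · simp only [hc, decide_true, if_true]
      refine List.pairwise_cons.mpr ⟨?_, h⟩
      intro b hb
      rcases List.mem_cons.mp hb with rfl | hb
      · omega
      · have := hy b hb; omega
    · simp only [hc, decide_false, Bool.false_eq_true, if_false]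
      refine List.pairwise_cons.mpr ⟨?_, ih ht⟩
      intro b hb
      rcases (PySem.List.mem_insertBy _ _ _ _).mp hb with rfl | hb
      · omega
      · exact hy b hb

lemma pvFind?_insertBy (v : List Char × List Char → Bool) (key : List Char × List Char → Int)
    (x : List Char × List Char) (ys : List (List Char × List Char))
    (h : ys.Pairwise (fun a b => key b ≤ key a)) :
    (PySem.List.insertBy (fun a b => decide (key b < key a)) x ys).find? v
      = match ys.find? v with
        | none => if v x then some x else none
        | some q => if v x ∧ key q < key x then some x else some q := by
  induction ys with
  | nil =>
    simp only [PySem.List.insertBy, List.find?]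
    by_cases hv : v x <;> simp [hv]
  | cons y t ih =>
    rcases List.pairwise_cons.mp h with ⟨hy, ht⟩
    rw [PySem.List.insertBy.eq_def]
    by_cases hc : key y < key x
    · simp only [hc, decide_true, if_true]
      by_cases hv : v x = true
      · rcases hq : (y :: t).find? v with _ | q
        · rw [List.find?_cons_of_pos hv]
          simp [hv]
        · have hqm : q ∈ y :: t := List.mem_of_find?_eq_some hq
          have hql : key q < key x := by
            rcases List.mem_cons.mp hqm with rfl | hqm
            · omega
            · have := hy q hqm; omega
          rw [List.find?_cons_of_pos hv]
          simp [hv, hql]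
      · rcases hq : (y :: t).find? v with _ | q
        · rw [List.find?_cons_of_neg (by simp [hv]), hq]
          simp [hv]
        · rw [List.find?_cons_of_neg (by simp [hv]), hq]
          simp [hv]
    · simp only [hc, decide_false, Bool.false_eq_true, if_false]
      by_cases hvy : v y
      · rw [List.find?_cons_of_pos hvy, List.find?_cons_of_pos hvy]
        exact (if_neg (by rintro ⟨-, hlt⟩; omega)).symm
      · rw [List.find?_cons_of_neg (by simp [hvy]), List.find?_cons_of_neg (by simp [hvy])]
        exact ih ht

-- the step of B applied to a "best so far" is exactly the match on the right of pvFind?_insertBy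
lemma pvStep'_eq_match (s : List Char) (best : Option (List Char × List Char))
    (x : List Char × List Char) :
    pvStep' s best x
      = match best with
        | none => if pvValid s x then some x else none
        | some q => if pvValid s x ∧ PySem.List.len q.1 < PySem.List.len x.1 then some x else some q := by
  cases best with
  | none =>
    by_cases h1 : x.1 = [] ∨ x.2 = [] <;>
      by_cases h2 : PySem.Chars.startswith s (pvPfx x.1) = true <;>
        simp [pvStep', pvValid, h1, h2]
  | some q =>
    by_cases h1 : x.1 = [] ∨ x.2 = [] <;>
      by_cases h2 : PySem.Chars.startswith s (pvPfx x.1) = true <;>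
        by_cases h3 : PySem.List.len q.1 < PySem.List.len x.1 <;>
          simp [pvStep', pvValid, h1, h2]

-- descending-sortedness of the sorted list, via the insertBy fold
lemma pvSorted_pairwise (l : List (List Char × List Char)) :
    (PySem.List.sorted l (fun p => PySem.List.len p.1) true).Pairwise
      (fun a b => PySem.List.len b.1 ≤ PySem.List.len a.1) := by
  rw [PySem.List.sorted_rev_eq_foldl_insertBy]
  suffices h : ∀ (m : List (List Char × List Char)) (acc : List (List Char × List Char)),
      acc.Pairwise (fun a b => PySem.List.len b.1 ≤ PySem.List.len a.1) →
      (m.foldl (fun acc x =>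
          PySem.List.insertBy (fun a b => decide (PySem.List.len b.1 < PySem.List.len a.1)) x acc) acc).Pairwise
        (fun a b => PySem.List.len b.1 ≤ PySem.List.len a.1) by
    exact h l [] (by simp)
  intro m
  induction m with
  | nil => intro acc h; simpa using h
  | cons x t ih =>
    intro acc h
    exact ih _ (pvPairwise_insertBy _ x acc h)

-- MAIN: first valid entry of the reverse-sorted list = B's longest-match fold
lemma pvMain (s : List Char) (l : List (List Char × List Char)) :
    (PySem.List.sorted l (fun p => PySem.List.len p.1) true).find? (pvValid s)
      = l.foldl (pvStep' s) none := by
  induction l using List.reverseRecOn with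
  | nil => rfl
  | append_singleton t x ih =>
    rw [List.foldl_append, List.foldl_cons, List.foldl_nil,
      PySem.List.sorted_rev_eq_foldl_insertBy, List.foldl_append, List.foldl_cons, List.foldl_nil,
      ← PySem.List.sorted_rev_eq_foldl_insertBy,
      pvFind?_insertBy (pvValid s) (fun p => PySem.List.len p.1) x _ (pvSorted_pairwise t),
      ih, pvStep'_eq_match]

-- ===== VERDICT (by name: the statement is the Claim_ definition above) =====
theorem normalize_unc_to_drive_spec : Claim_equal_normalize_unc_to_drive := by
  intro path unc_mappings _
  unfold Spec_normalize_unc_to_drive normalize_unc_to_drive normalize_unc_to_drive_alt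
  by_cases h0 : path = "" ∨ unc_mappings = []
  · rw [if_pos h0, if_pos h0]
  · rw [if_neg h0, if_neg h0]
    set s := PySem.Chars.replace path.toList ['\\'] ['/'] with hs
    by_cases h1 : 2 ≤ PySem.List.len s ∧ PySem.List.pyGet? s 1 = some ':'
    · rw [if_pos h1, if_pos h1]
    · rw [if_neg h1, if_neg h1]
      rw [pvLoopA_eq_find]
      have hfold : (PySem.Dict.ofList unc_mappings).items.foldl (pvStep s) none
          = ((PySem.Dict.ofList unc_mappings).items.map pvNorm).foldl (pvStep' s) none := by
        rw [List.foldl_map]; rfl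
      rw [hfold, ← pvMain s]
      cases hq : (PySem.List.sorted ((PySem.Dict.ofList unc_mappings).items.map pvNorm)
          (fun kv => PySem.List.len kv.1) true).find? (pvValid s) with
      | none => rfl
      | some q => obtain ⟨k, d⟩ := q; rfl
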